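-- pv_equiv track=rewrite | github.com/aditchopra18/Custom-NER-using-BiLSTM-LSTM-and-BERT-with-Attention-Mechanims | Code/LSTM+Attention/BiLSTM_CrossAttention_NER.py | tag_annotations
-- ===== SOURCE A (Python) =====
-- def tag_annotations(sentences, annotations):
--     tagged_sentences = []
--     for sentence in sentences:
--         tags = ['O'] * len(sentence)
--         word_starts, word_ends, char_pos = [], [], 0
--         for word in sentence:
--             word_starts.append(char_pos)
--             char_pos += len(word)
--             word_ends.append(char_pos)
--             char_pos += 1
--         for start, end, _, label in annotations:
--             for i, (word_start, word_end) in enumerate(zip(word_starts, word_ends)):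
--                 if word_start >= start and word_end <= end:
--                     if label == 'Modifier':
--                         tags[i] = 'I-' + 'SpecificDisease'
--                     else:
--                         tags[i] = 'I-' + label
--                 elif word_start < start < word_end or word_start < end < word_end:
--                     if label == 'Modifier':
--                         tags[i] = 'I-' + 'SpecificDisease'
--                     else:
--                         tags[i] = 'I-' + label
--         tagged_sentences.append((sentence, tags))
--     return tagged_sentences
-- ===== SOURCE B (Python) =====
-- def tag_annotations(sentences, annotations):
--     # Loop order transposed: per word, scan annotations newest-first and take the
--     # first match (A's last-write-wins), instead of mutating a tags array per annotation.
--     rev = list(reversed(annotations))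
--     tagged_sentences = []
--     for sentence in sentences:
--         bounds = []
--         pos = 0
--         for word in sentence:
--             bounds.append((pos, pos + len(word)))
--             pos += len(word) + 1
--         tags = []
--         for ws, we in bounds:
--             tag = 'O'
--             for start, end, _, label in rev:
--                 if (ws >= start and we <= end) or ws < start < we or ws < end < we:
--                     tag = 'I-SpecificDisease' if label == 'Modifier' else 'I-' + label
--                     break
--             tags.append(tag)
--         tagged_sentences.append((sentence, tags))
--     return tagged_sentences
-- ===== Notes on version B (the rewrite author's own statement) =====
-- stated objective: simpler
-- what changed: B transposes the loops: instead of mutating a tags array once per annotation (last write wins) it computes each word's tag directly as the first match over the reversed annotation list with an early break, and merges A's two duplicated branch bodies into one condition.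
import Mathlib
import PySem

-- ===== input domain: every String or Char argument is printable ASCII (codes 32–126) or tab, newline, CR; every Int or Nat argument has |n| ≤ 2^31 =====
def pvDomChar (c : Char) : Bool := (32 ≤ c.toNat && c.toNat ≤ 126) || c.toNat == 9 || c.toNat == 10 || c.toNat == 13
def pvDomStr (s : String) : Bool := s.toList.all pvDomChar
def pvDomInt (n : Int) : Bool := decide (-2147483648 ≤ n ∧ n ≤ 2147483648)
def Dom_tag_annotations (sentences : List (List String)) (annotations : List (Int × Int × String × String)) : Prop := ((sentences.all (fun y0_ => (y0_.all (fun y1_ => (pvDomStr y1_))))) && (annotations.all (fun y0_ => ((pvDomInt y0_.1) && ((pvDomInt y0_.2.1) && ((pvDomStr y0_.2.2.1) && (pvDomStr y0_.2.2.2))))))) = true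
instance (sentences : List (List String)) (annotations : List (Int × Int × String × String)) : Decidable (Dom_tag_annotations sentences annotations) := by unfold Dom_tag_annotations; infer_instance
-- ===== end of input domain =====

-- B transposes A's loops (per-word first match over the reversed annotation list, with an
-- early break, instead of a mutated tags array per annotation): a simpler decomposition,
-- no speed claim. Proven: identical return values on all inputs in Dom.

-- ===== PORT A =====
-- inner body of 'for word in sentence': state (word_starts, word_ends, char_pos)
def aBoundsStep (st : List Int × List Int × Int) (word : String) : List Int × List Int × Int :=
  let word_starts := st.1 ++ [st.2.2]
  let char_pos := st.2.2 + PySem.Str.len word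
  let word_ends := st.2.1 ++ [char_pos]
  (word_starts, word_ends, char_pos + 1)

-- body of 'for i, (word_start, word_end) in enumerate(...)'; tags[i] = … is always
-- in range in A (i indexes zip(word_starts, word_ends) of the same length as tags),
-- so pySetD is exact here
def aTagStep (start end_ : Int) (label : String) (tags : List String) (p : Int × Int × Int) : List String :=
  if p.2.1 ≥ start ∧ p.2.2 ≤ end_ then
    (if label = "Modifier" then PySem.List.pySetD tags p.1 ("I-" ++ "SpecificDisease")
     else PySem.List.pySetD tags p.1 ("I-" ++ label))
  else if (p.2.1 < start ∧ start < p.2.2) ∨ (p.2.1 < end_ ∧ end_ < p.2.2) then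
    (if label = "Modifier" then PySem.List.pySetD tags p.1 ("I-" ++ "SpecificDisease")
     else PySem.List.pySetD tags p.1 ("I-" ++ label))
  else tags

-- body of 'for start, end, _, label in annotations'
def aAnnStep (word_starts word_ends : List Int) (tags : List String) (a : Int × Int × String × String) : List String :=
  (PySem.List.enumerate (word_starts.zip word_ends) 0).foldl (aTagStep a.1 a.2.1 a.2.2.2) tags

def tag_annotations (sentences : List (List String)) (annotations : List (Int × Int × String × String)) : List (List String × List String) :=
  sentences.foldl (fun tagged_sentences sentence =>
    let tags : List String := List.replicate sentence.length "O"
    let st := sentence.foldl aBoundsStep ([], [], 0)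
    let tags := annotations.foldl (aAnnStep st.1 st.2.1) tags
    tagged_sentences ++ [(sentence, tags)]) []

-- ===== PORT B =====
-- body of 'for word in sentence': state (bounds, pos)
def bBoundsStep (st : List (Int × Int) × Int) (word : String) : List (Int × Int) × Int :=
  (st.1 ++ [(st.2, st.2 + PySem.Str.len word)], st.2 + PySem.Str.len word + 1)

-- the merged overlap condition of B
def bCond (ws we : Int) (a : Int × Int × String × String) : Bool :=
  (decide (ws ≥ a.1) && decide (we ≤ a.2.1)) ||
  (decide (ws < a.1) && decide (a.1 < we)) ||
  (decide (ws < a.2.1) && decide (a.2.1 < we))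

-- 'for start, end, _, label in rev: … break' = first match on rev
def bTag (rev : List (Int × Int × String × String)) (b : Int × Int) : String :=
  match rev.find? (bCond b.1 b.2) with
  | some a => if a.2.2.2 = "Modifier" then "I-SpecificDisease" else "I-" ++ a.2.2.2
  | none => "O"

def tag_annotations_alt (sentences : List (List String)) (annotations : List (Int × Int × String × String)) : List (List String × List String) :=
  let rev := annotations.reverse
  sentences.foldl (fun tagged_sentences sentence =>
    let bounds := (sentence.foldl bBoundsStep ([], 0)).1
    tagged_sentences ++ [(sentence, bounds.map (bTag rev))]) []

-- ===== PRECONDITION & SPEC =====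
def Spec_tag_annotations (sentences : List (List String)) (annotations : List (Int × Int × String × String)) (out : List (List String × List String)) : Prop := out = tag_annotations_alt sentences annotations
instance (sentences : List (List String)) (annotations : List (Int × Int × String × String)) (out : List (List String × List String)) : Decidable (Spec_tag_annotations sentences annotations out) := by unfold Spec_tag_annotations; infer_instance

-- ===== CLAIM (what is proved, stated in full; the proofs are below) =====
def Claim_equal_tag_annotations : Prop := ∀ (sentences : List (List String)) (annotations : List (Int × Int × String × String)), Dom_tag_annotations sentences annotations → Spec_tag_annotations sentences annotations (tag_annotations sentences annotations)

-- ===== LEMMAS AND PROOFS =====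

-- the tag an annotation writes (same in both programs)
def tagOf (a : Int × Int × String × String) : String :=
  if a.2.2.2 = "Modifier" then "I-SpecificDisease" else "I-" ++ a.2.2.2

-- A's duplicated branches collapse to B's merged condition
theorem aTagStep_eq (a : Int × Int × String × String) (tags : List String) (p : Int × Int × Int) :
    aTagStep a.1 a.2.1 a.2.2.2 tags p =
      if bCond p.2.1 p.2.2 a then PySem.List.pySetD tags p.1 (tagOf a) else tags := by
  have hs : ("I-" ++ "SpecificDisease" : String) = "I-SpecificDisease" := rfl
  simp only [aTagStep, bCond, tagOf, hs]
  split_ifs with h1 h2 h3 h4 h5 h6 h7 <;> simp_all <;> omega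

theorem aTagStep_length (s e : Int) (l : String) (tags : List String) (p : Int × Int × Int) :
    (aTagStep s e l tags p).length = tags.length := by
  simp only [aTagStep]
  split_ifs <;> simp [PySem.List.length_pySetD]

theorem aAnnStep_length (ws we : List Int) (tags : List String) (a : Int × Int × String × String) :
    (aAnnStep ws we tags a).length = tags.length := by
  unfold aAnnStep
  generalize PySem.List.enumerate ((ws.zip we)) 0 = l
  induction l generalizing tags with
  | nil => rfl
  | cons p t ih => rw [List.foldl_cons, ih (aTagStep a.1 a.2.1 a.2.2.2 tags p), aTagStep_length]

-- the bounds folds of A and B compute the same word-boundary pairs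
theorem bounds_eq : ∀ (sentence : List String) (ws we : List Int) (pos : Int),
    ws.length = we.length →
    (sentence.foldl aBoundsStep (ws, we, pos)).1.length = (sentence.foldl aBoundsStep (ws, we, pos)).2.1.length ∧
    (sentence.foldl aBoundsStep (ws, we, pos)).1.length = ws.length + sentence.length ∧
    (sentence.foldl aBoundsStep (ws, we, pos)).1.zip (sentence.foldl aBoundsStep (ws, we, pos)).2.1 =
      (sentence.foldl bBoundsStep (ws.zip we, pos)).1 := by
  intro sentence
  induction sentence with
  | nil => intro ws we pos h; exact ⟨h, by simp, rfl⟩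
  | cons w t ih =>
    intro ws we pos h
    simp only [List.foldl_cons, aBoundsStep, bBoundsStep]
    have h' : (ws ++ [pos]).length = (we ++ [pos + PySem.Str.len w]).length := by simp [h]
    have := ih (ws ++ [pos]) (we ++ [pos + PySem.Str.len w]) (pos + PySem.Str.len w + 1) h'
    refine ⟨this.1, by simp at this ⊢; omega, ?_⟩
    rw [this.2.2, List.zip_append h]
    simp

-- pointwise effect of A's enumerate loop for one annotation
theorem inner_go (a : Int × Int × String × String) :
    ∀ (ps : List (Int × Int)) (s : Nat) (tags : List String) (j : Nat),
    s + ps.length ≤ tags.length →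
    ((PySem.List.enumerate ps (s : Int)).foldl (aTagStep a.1 a.2.1 a.2.2.2) tags)[j]? =
      if (s ≤ j ∧ j < s + ps.length) ∧ bCond (ps.getD (j - s) (0,0)).1 (ps.getD (j - s) (0,0)).2 a
      then some (tagOf a) else tags[j]? := by
  intro ps
  induction ps with
  | nil =>
    intro s tags j h
    rw [if_neg (by simp only [List.length_nil]; rintro ⟨⟨h1,h2⟩,-⟩; omega)]
    simp [PySem.List.enumerate]
  | cons p t ih =>
    intro s tags j h
    rw [PySem.List.enumerate_cons]
    simp only [List.foldl_cons, aTagStep_eq]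
    have hcast : ((s : Int) + 1) = ((s + 1 : Nat) : Int) := by push_cast; ring
    rw [hcast]
    have hslen : s < tags.length := by simp at h; omega
    have hset : PySem.List.pySetD tags (s : Int) (tagOf a) = tags.set s (tagOf a) := by simp
    have hlen' : (if bCond p.1 p.2 a then PySem.List.pySetD tags (s : Int) (tagOf a) else tags).length = tags.length := by
      split <;> simp
    rw [ih (s+1) _ j (by rw [hlen']; simp at h ⊢; omega)]
    by_cases hj : j = s
    · subst hj
      rw [if_neg (by rintro ⟨⟨h1,-⟩,-⟩; omega)]
      rw [hset]
      cases hbc : bCond p.1 p.2 a <;> simp [hbc, hslen]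
    · have hne : (if bCond p.1 p.2 a then PySem.List.pySetD tags (s : Int) (tagOf a) else tags)[j]? = tags[j]? := by
        rw [hset]; split <;> simp [Ne.symm hj]
      rw [hne]
      by_cases hin : s + 1 ≤ j ∧ j < s + 1 + t.length
      · have h1 : j - s = (j - (s+1)) + 1 := by omega
        have h2 : (p :: t).getD (j - s) (0,0) = t.getD (j - (s+1)) (0,0) := by rw [h1]; rfl
        have h3 : (s ≤ j ∧ j < s + (p :: t).length) ↔ (s + 1 ≤ j ∧ j < s + 1 + t.length) := by
          simp only [List.length_cons]; omega
        simp only [h2, h3]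
      · rw [if_neg (fun hx => hin hx.1), if_neg (by rintro ⟨⟨h1,h2⟩,-⟩; simp only [List.length_cons] at h2; omega)]

-- pointwise effect of A's annotation loop
theorem outer_go (ws we : List Int) :
    ∀ (l : List (Int × Int × String × String)) (tags : List String) (j : Nat),
    tags.length = (ws.zip we).length → j < (ws.zip we).length →
    (l.foldl (aAnnStep ws we) tags)[j]? =
      some (l.foldl (fun t a => if bCond ((ws.zip we).getD j (0,0)).1 ((ws.zip we).getD j (0,0)).2 a then tagOf a else t)
            (tags.getD j "O")) := by
  intro l
  induction l with
  | nil =>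
    intro tags j hlen hj
    have hjt : j < tags.length := by omega
    simp [List.getElem?_eq_getElem hjt, List.getD_eq_getElem?_getD]
  | cons a t ih =>
    intro tags j hlen hj
    rw [List.foldl_cons, List.foldl_cons,
        ih (aAnnStep ws we tags a) j (by rw [aAnnStep_length]; exact hlen) hj]
    have h0 : PySem.List.enumerate (ws.zip we) (0:Int) = PySem.List.enumerate (ws.zip we) ((0:Nat):Int) := by norm_num
    have hi := inner_go a (ws.zip we) 0 tags j (by omega)
    have hup : (aAnnStep ws we tags a)[j]? =
        if bCond ((ws.zip we).getD j (0,0)).1 ((ws.zip we).getD j (0,0)).2 a then some (tagOf a) else tags[j]? := by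
      unfold aAnnStep
      rw [h0, hi]
      simp only [Nat.sub_zero]
      by_cases hbc : bCond ((ws.zip we).getD j (0,0)).1 ((ws.zip we).getD j (0,0)).2 a = true
      · rw [if_pos ⟨⟨Nat.zero_le _, by omega⟩, hbc⟩, if_pos hbc]
      · rw [if_neg (fun hx => hbc hx.2), if_neg hbc]
    have hkey : (aAnnStep ws we tags a).getD j "O" =
        if bCond ((ws.zip we).getD j (0,0)).1 ((ws.zip we).getD j (0,0)).2 a then tagOf a else tags.getD j "O" := by
      rw [List.getD_eq_getElem?_getD, hup]
      split <;> simp [List.getD_eq_getElem?_getD]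
    rw [hkey]

theorem annFold_length (ws we : List Int) (l : List (Int × Int × String × String)) (tags : List String) :
    (l.foldl (aAnnStep ws we) tags).length = tags.length := by
  induction l generalizing tags with
  | nil => rfl
  | cons a t ih => rw [List.foldl_cons, ih (aAnnStep ws we tags a), aAnnStep_length]

-- last-write-wins fold = first match on the reversed list
theorem foldl_eq_find?_reverse (c : (Int × Int × String × String) → Bool) :
    ∀ (l : List (Int × Int × String × String)) (x : String),
    l.foldl (fun t a => if c a then tagOf a else t) x =
      match l.reverse.find? c with | some a => tagOf a | none => x := by
  intro l
  induction l with
  | nil => intro x; rfl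
  | cons a t ih =>
    intro x
    simp only [List.foldl_cons, List.reverse_cons, List.find?_append]
    rw [ih]
    cases hf : t.reverse.find? c <;> cases hc : c a <;> simp [List.find?, hc]

theorem sentence_eq (annotations : List (Int × Int × String × String)) (sentence : List String) :
    (annotations.foldl
        (aAnnStep (sentence.foldl aBoundsStep ([], [], 0)).1 (sentence.foldl aBoundsStep ([], [], 0)).2.1)
        (List.replicate sentence.length "O")) =
      ((sentence.foldl bBoundsStep ([], 0)).1).map (bTag annotations.reverse) := by
  have hb := bounds_eq sentence [] [] 0 rfl
  have hzip : (sentence.foldl aBoundsStep ([], [], 0)).1.zip (sentence.foldl aBoundsStep ([], [], 0)).2.1 =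
      (sentence.foldl bBoundsStep ([], 0)).1 := hb.2.2
  have hplen : ((sentence.foldl aBoundsStep ([], [], 0)).1.zip (sentence.foldl aBoundsStep ([], [], 0)).2.1).length
      = sentence.length := by
    rw [List.length_zip, ← hb.1, Nat.min_self, hb.2.1, List.length_nil, Nat.zero_add]
  apply List.ext_getElem?
  intro j
  by_cases hj : j < sentence.length
  · rw [outer_go _ _ annotations (List.replicate sentence.length "O") j
        (by rw [List.length_replicate, hplen]) (by omega)]
    have hrep : (List.replicate sentence.length "O").getD j "O" = "O" := by
      rw [List.getD_eq_getElem?_getD]; simp [hj]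
    rw [hrep]
    have hjb : j < ((sentence.foldl bBoundsStep ([], 0)).1).length := by rw [← hzip]; omega
    rw [List.getElem?_map, List.getElem?_eq_getElem hjb]
    have hbt : ∀ (b : Int × Int), bTag annotations.reverse b =
        annotations.foldl (fun t a => if bCond b.1 b.2 a then tagOf a else t) "O" := by
      intro b
      rw [foldl_eq_find?_reverse (bCond b.1 b.2) annotations "O"]
      rfl
    rw [Option.map_some, hbt]
    have hgd : ((sentence.foldl aBoundsStep ([], [], 0)).1.zip (sentence.foldl aBoundsStep ([], [], 0)).2.1).getD j (0,0)
        = ((sentence.foldl bBoundsStep ([], 0)).1)[j] := by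
      rw [hzip, List.getD_eq_getElem?_getD, List.getElem?_eq_getElem hjb]; rfl
    rw [hgd]
  · rw [List.getElem?_eq_none, List.getElem?_eq_none]
    · rw [List.length_map, ← hzip]; omega
    · rw [annFold_length, List.length_replicate]; omega

-- ===== VERDICT (by name: the statement is the Claim_ definition above) =====
theorem tag_annotations_spec : Claim_equal_tag_annotations := by
  intro sentences annotations _
  unfold Spec_tag_annotations tag_annotations tag_annotations_alt
  rw [PySem.List.foldl_append_singleton_eq_map, PySem.List.foldl_append_singleton_eq_map]
  refine List.map_congr_left ?_
  intro sentence _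
  exact congrArg (Prod.mk sentence) (sentence_eq annotations sentence)
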